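-- pv_equiv track=rewrite | github.com/rcgalbo/advent-of-code-18 | day-11.py | sum_nXn
-- ===== SOURCE A (Python) =====
-- from typing import List, Tuple
--
-- def sum_nXn(grid: List[int], dim: Tuple[int,int] = (3,3)) -> List[int]:
--
--     sum_grid = [[0 for _ in range(300-dim[0])]
--                     for Y in range(300-dim[1])]
--
--     for X in range(300-dim[0]):
--         for Y in range(300-dim[1]):
--
--             sub = [x[X:X+dim[0]] for x in grid[Y:Y+dim[1]]]
--             sum_grid[Y][X] = sum(sum(l) for l in sub)
--
--     return sum_grid
-- ===== SOURCE B (Python) =====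
-- from typing import List, Tuple
--
-- def sum_nXn(grid: List[int], dim: Tuple[int,int] = (3,3)) -> List[int]:
--     # Horizontal window sums per row first, then each output row is the
--     # element-wise sum of the dim[1] row-window lists below it.
--     dx, dy = dim
--     row_win = [[sum(row[X:X + dx]) for X in range(300 - dx)] for row in grid]
--     out = []
--     for Y in range(300 - dy):
--         cur = [0] * (300 - dx)
--         for r in row_win[Y:Y + dy]:
--             cur = [a + b for a, b in zip(cur, r)]
--         out.append(cur)
--     return out
-- ===== Notes on version B (the rewrite author's own statement) =====
-- stated objective: alternative
-- what changed: B computes each row's horizontal window sums once and accumulates them down each vertical window by element-wise list addition, instead of A's slicing out and re-summing a fresh dim[0] x dim[1] sub-block for every window cell.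
import Mathlib
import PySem

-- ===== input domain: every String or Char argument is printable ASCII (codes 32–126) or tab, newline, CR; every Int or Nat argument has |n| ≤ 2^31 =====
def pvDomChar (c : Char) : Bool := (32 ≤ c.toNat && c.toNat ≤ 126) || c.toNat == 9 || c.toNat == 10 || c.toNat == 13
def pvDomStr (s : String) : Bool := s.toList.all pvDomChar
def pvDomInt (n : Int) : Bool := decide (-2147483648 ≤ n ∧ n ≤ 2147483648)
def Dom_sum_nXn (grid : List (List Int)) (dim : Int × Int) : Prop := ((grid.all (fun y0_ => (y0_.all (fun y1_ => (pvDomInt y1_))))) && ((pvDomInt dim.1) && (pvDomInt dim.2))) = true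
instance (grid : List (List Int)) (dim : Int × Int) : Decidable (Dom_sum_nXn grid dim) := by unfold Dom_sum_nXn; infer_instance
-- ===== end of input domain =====

-- B: horizontal window sums per row first, then each output row is the element-wise
-- sum of the dim[1] row-window lists below it (instead of A's per-cell sub-block summing).

-- ===== PORT A =====
def sum_nXn (grid : List (List Int)) (dim : Int × Int) : List (List Int) :=
  let sumGrid : List (List Int) :=
    (PySem.List.pyRange 0 (300 - dim.2) 1).map
      (fun _ => (PySem.List.pyRange 0 (300 - dim.1) 1).map (fun _ => (0 : Int)))
  (PySem.List.pyRange 0 (300 - dim.1) 1).foldl (fun sg X =>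
    (PySem.List.pyRange 0 (300 - dim.2) 1).foldl (fun sg Y =>
      let sub := (PySem.List.slice grid (some Y) (some (Y + dim.2))).map
                   (fun x => PySem.List.slice x (some X) (some (X + dim.1)))
      let v := (sub.map (fun l => l.sum)).sum
      -- sum_grid[Y][X] = v  (Y and X are always in range here, so pySetD/pyGetD are exact)
      PySem.List.pySetD sg Y (PySem.List.pySetD (PySem.List.pyGetD sg Y []) X v)
    ) sg) sumGrid

-- ===== PORT B =====
def sum_nXn_alt (grid : List (List Int)) (dim : Int × Int) : List (List Int) :=
  let dx := dim.1
  let dy := dim.2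
  let rowWin : List (List Int) := grid.map (fun row =>
    (PySem.List.pyRange 0 (300 - dx) 1).map (fun X =>
      (PySem.List.slice row (some X) (some (X + dx))).sum))
  (PySem.List.pyRange 0 (300 - dy) 1).foldl (fun out Y =>
    let cur0 : List Int := List.replicate (300 - dx).toNat 0   -- [0] * (300 - dx)
    let cur := (PySem.List.slice rowWin (some Y) (some (Y + dy))).foldl
      (fun cur r => (cur.zip r).map (fun p => p.1 + p.2)) cur0
    out ++ [cur]) []

-- ===== PRECONDITION & SPEC =====
def Spec_sum_nXn (grid : List (List Int)) (dim : Int × Int) (out : List (List Int)) : Prop :=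
  out = sum_nXn_alt grid dim
instance (grid : List (List Int)) (dim : Int × Int) (out : List (List Int)) :
    Decidable (Spec_sum_nXn grid dim out) := by unfold Spec_sum_nXn; infer_instance

-- ===== CLAIM (what is proved, stated in full; the proofs are below) =====
def Claim_equal_sum_nXn : Prop := ∀ (grid : List (List Int)) (dim : Int × Int),
  Dom_sum_nXn grid dim → Spec_sum_nXn grid dim (sum_nXn grid dim)

-- ===== LEMMAS AND PROOFS =====

-- the sum over one window, exactly as A computes it
def pvWnd (grid : List (List Int)) (dx dy Y X : Int) : Int :=
  (((PySem.List.slice grid (some Y) (some (Y + dy))).map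
      (fun x => PySem.List.slice x (some X) (some (X + dx)))).map (fun l => l.sum)).sum

-- A's target matrix with the first m columns filled in
def pvM (grid : List (List Int)) (dx dy : Int) (m : Nat) : List (List Int) :=
  (List.range (300 - dy).toNat).map (fun (Yk : Nat) =>
    (List.range (300 - dx).toNat).map (fun (Xk : Nat) =>
      if Xk < m then pvWnd grid dx dy (Yk : Int) (Xk : Int) else 0))

lemma pv_pySetD_inrange (xs : List Int) (k : Nat) (h : k < xs.length) (v : Int) :
    PySem.List.pySetD xs (k : Int) v = xs.set k v := by
  unfold PySem.List.pySetD PySem.List.pySet?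
  simp [PySem.List.pyIdx?, h]

lemma pv_pySetD_inrange' (xs : List (List Int)) (k : Nat) (h : k < xs.length) (v : List Int) :
    PySem.List.pySetD xs (k : Int) v = xs.set k v := by
  unfold PySem.List.pySetD PySem.List.pySet?
  simp [PySem.List.pyIdx?, h]

lemma pvM_length (grid : List (List Int)) (dx dy : Int) (m : Nat) :
    (pvM grid dx dy m).length = (300 - dy).toNat := by
  unfold pvM; rw [List.length_map, List.length_range]

lemma pvM_getElem (grid : List (List Int)) (dx dy : Int) (m i : Nat) (h : i < (300 - dy).toNat) :
    (pvM grid dx dy m)[i]'(by rw [pvM_length]; exact h)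
      = (List.range (300 - dx).toNat).map
          (fun (Xk : Nat) => if Xk < m then pvWnd grid dx dy (i : Int) (Xk : Int) else 0) := by
  unfold pvM
  rw [List.getElem_map, List.getElem_range]

lemma pv_row_set (w : Nat → Int) (W m : Nat) :
    ((List.range W).map (fun Xk => if Xk < m then w Xk else 0)).set m (w m)
      = (List.range W).map (fun Xk => if Xk < m + 1 then w Xk else 0) := by
  apply List.ext_getElem
  · simp
  · intro j hj1 hj2
    simp only [List.getElem_set, List.getElem_map, List.getElem_range]
    split_ifs <;> simp_all <;> omega

lemma pv_col_step (grid : List (List Int)) (dx dy : Int) (m : Nat) (hm : m < (300 - dx).toNat) :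
    ((pvM grid dx dy m).zipIdx 0).map
        (fun p => PySem.List.pySetD p.1 (m : Int) (pvWnd grid dx dy (p.2 : Int) (m : Int)))
      = pvM grid dx dy (m + 1) := by
  apply List.ext_getElem
  · rw [List.length_map, List.length_zipIdx, pvM_length, pvM_length]
  · intro i h1 h2
    have hi : i < (300 - dy).toNat := by
      rw [List.length_map, List.length_zipIdx, pvM_length] at h1; exact h1
    simp only [List.getElem_map, List.getElem_zipIdx, Nat.zero_add]
    rw [pvM_getElem grid dx dy m i hi,
        pv_pySetD_inrange _ _ (by simpa using hm) _, pv_row_set,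
        pvM_getElem grid dx dy (m + 1) i hi]

lemma pv_setfold (g : Nat → List Int → List Int) :
    ∀ (sg pre : List (List Int)),
      (List.range' pre.length sg.length).foldl
        (fun s (k : Nat) => PySem.List.pySetD s (k : Int)
            (g k (PySem.List.pyGetD s (k : Int) []))) (pre ++ sg)
      = pre ++ (sg.zipIdx pre.length).map (fun p => g p.2 p.1) := by
  intro sg
  induction sg with
  | nil => intro pre; simp
  | cons x sg ih =>
    intro pre
    rw [List.length_cons, List.range'_succ, List.foldl_cons]
    rw [PySem.List.pyGetD_natCast]
    have h1 : (pre ++ x :: sg).getD pre.length [] = x := by simp [List.getD]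
    rw [h1, pv_pySetD_inrange' _ _ (by simp) _]
    have h2 : (pre ++ x :: sg).set pre.length (g pre.length x)
        = (pre ++ [g pre.length x]) ++ sg := by simp
    rw [h2]
    have h3 : pre.length + 1 = (pre ++ [g pre.length x]).length := by simp
    rw [h3, ih (pre ++ [g pre.length x])]
    simp [List.zipIdx_cons]

lemma pv_setfold0 (g : Nat → List Int → List Int) (sg : List (List Int)) :
    (List.range sg.length).foldl
        (fun s (k : Nat) => PySem.List.pySetD s (k : Int)
            (g k (PySem.List.pyGetD s (k : Int) []))) sg
      = (sg.zipIdx 0).map (fun p => g p.2 p.1) := by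
  have h := pv_setfold g sg []
  simpa [List.range_eq_range'] using h

lemma pvM_zero (grid : List (List Int)) (dx dy : Int) :
    pvM grid dx dy 0
      = (List.range (300 - dy).toNat).map
          (fun _ => (List.range (300 - dx).toNat).map (fun _ => (0 : Int))) := by
  simp [pvM]

lemma pv_A_outer (grid : List (List Int)) (dx dy : Int) :
    ∀ m, m ≤ (300 - dx).toNat →
      (List.range m).foldl
        (fun sg (X : Nat) =>
          (List.range (300 - dy).toNat).foldl
            (fun s (k : Nat) => PySem.List.pySetD s (k : Int)
              (PySem.List.pySetD (PySem.List.pyGetD s (k : Int) []) (X : Int)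
                ((List.map (fun x => (PySem.List.slice x (some (X : Int)) (some ((X : Int) + dx))).sum)
                   (PySem.List.slice grid (some (k : Int)) (some ((k : Int) + dy)))).sum))) sg)
        ((List.range (300 - dy).toNat).map
          (fun _ => (List.range (300 - dx).toNat).map (fun _ => (0 : Int))))
      = pvM grid dx dy m := by
  intro m
  induction m with
  | zero => intro _; rw [List.range_zero, List.foldl_nil, pvM_zero]
  | succ m ih =>
    intro hm
    rw [List.range_succ, List.foldl_append, ih (by omega), List.foldl_cons, List.foldl_nil]
    rw [show (300 - dy).toNat = (pvM grid dx dy m).length from (pvM_length grid dx dy m).symm]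
    rw [pv_setfold0 (fun k row => PySem.List.pySetD row (m : Int)
          ((List.map (fun x => (PySem.List.slice x (some (m : Int)) (some ((m : Int) + dx))).sum)
             (PySem.List.slice grid (some (k : Int)) (some ((k : Int) + dy)))).sum)) (pvM grid dx dy m)]
    have hcs := pv_col_step grid dx dy m (by omega)
    rw [← hcs]
    apply List.map_congr_left
    intro p _
    congr 1
    simp [pvWnd, List.map_map, Function.comp_def]

lemma pv_A_eq (grid : List (List Int)) (dx dy : Int) :
    sum_nXn grid (dx, dy) = pvM grid dx dy (300 - dx).toNat := by
  unfold sum_nXn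
  simp only [PySem.List.pyRange_one, List.foldl_map, List.map_map, Function.comp_def,
    zero_add, Int.sub_zero]
  exact pv_A_outer grid dx dy _ le_rfl


lemma pvM_full (grid : List (List Int)) (dx dy : Int) :
    pvM grid dx dy (300 - dx).toNat
      = (List.range (300 - dy).toNat).map (fun (Yk : Nat) =>
          (List.range (300 - dx).toNat).map (fun (Xk : Nat) =>
            pvWnd grid dx dy (Yk : Int) (Xk : Int))) := by
  unfold pvM
  apply List.map_congr_left
  intro Yk _
  apply List.map_congr_left
  intro Xk hXk
  rw [List.mem_range] at hXk
  rw [if_pos hXk]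

lemma pv_slice_map (l : List (List Int)) (f : List Int → List Int) (a b : Int) :
    PySem.List.slice (l.map f) (some a) (some b) = (PySem.List.slice l (some a) (some b)).map f := by
  simp [PySem.List.slice, List.map_take, List.map_drop]

lemma pv_map_getD_range (cur : List Int) (L : Nat) (h : cur.length = L) :
    (List.range L).map (fun k => cur.getD k 0) = cur := by
  apply List.ext_getElem
  · simp [h]
  · intro j h1 h2
    simp only [List.getElem_map, List.getElem_range]
    rw [List.getD_eq_getElem _ _ (by omega)]

lemma pv_zipfold (L : Nat) (win : List (List Int)) :
    ∀ (cur : List Int), cur.length = L → (∀ r ∈ win, r.length = L) →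
      win.foldl (fun cur r => (cur.zip r).map (fun p => p.1 + p.2)) cur
        = (List.range L).map (fun k => cur.getD k 0 + (win.map (fun r => r.getD k 0)).sum) := by
  induction win with
  | nil =>
    intro cur hc _
    simp only [List.foldl_nil, List.map_nil, List.sum_nil, add_zero]
    exact (pv_map_getD_range cur L hc).symm
  | cons r win ih =>
    intro cur hc hw
    have hr : r.length = L := hw r List.mem_cons_self
    have hc' : ((cur.zip r).map (fun p : Int × Int => p.1 + p.2)).length = L := by
      simp [hc, hr]
    rw [List.foldl_cons, ih _ hc' (fun x hx => hw x (List.mem_cons_of_mem r hx))]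
    apply List.map_congr_left
    intro k hk
    rw [List.mem_range] at hk
    have hget : ((cur.zip r).map (fun p : Int × Int => p.1 + p.2)).getD k 0
        = cur.getD k 0 + r.getD k 0 := by
      rw [List.getD_eq_getElem _ _ (by omega : k < ((cur.zip r).map (fun p : Int × Int => p.1 + p.2)).length),
        List.getElem_map, List.getElem_zip,
        List.getD_eq_getElem _ _ (by omega : k < cur.length),
        List.getD_eq_getElem _ _ (by omega : k < r.length)]
    rw [hget]
    simp [add_assoc]

lemma pv_B_eq (grid : List (List Int)) (dx dy : Int) :
    sum_nXn_alt grid (dx, dy) = pvM grid dx dy (300 - dx).toNat := by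
  unfold sum_nXn_alt
  simp only
  rw [PySem.List.foldl_append_singleton_eq_map, List.nil_append, pvM_full]
  simp only [PySem.List.pyRange_one, List.map_map, Function.comp_def, zero_add, Int.sub_zero]
  apply List.map_congr_left
  intro Yk _
  set f : List Int → List Int := fun row =>
    List.map (fun k : Nat => (PySem.List.slice row (some ((k : Nat) : Int))
      (some (((k : Nat) : Int) + dx))).sum) (List.range (300 - dx).toNat) with hf
  rw [pv_slice_map]
  have hlen : ∀ r ∈ (PySem.List.slice grid (some ((Yk : Nat) : Int))
      (some (((Yk : Nat) : Int) + dy))).map f, r.length = (300 - dx).toNat := by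
    intro r hr
    obtain ⟨row, _, rfl⟩ := List.mem_map.mp hr
    simp [hf]
  rw [pv_zipfold (300 - dx).toNat _ _ (by simp) hlen]
  apply List.map_congr_left
  intro Xk hXk
  rw [List.mem_range] at hXk
  have hz : (List.replicate (300 - dx).toNat (0 : Int)).getD Xk 0 = 0 := by
    rw [List.getD_eq_getElem _ _ (by simpa using hXk), List.getElem_replicate]
  rw [hz, zero_add]
  unfold pvWnd
  rw [List.map_map, List.map_map]
  apply congrArg
  apply List.map_congr_left
  intro row _
  simp only [Function.comp_def, hf]
  rw [List.getD_eq_getElem _ _ (by simpa using hXk)]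
  simp

-- ===== VERDICT (by name: the statement is the Claim_ definition above) =====
theorem sum_nXn_spec : Claim_equal_sum_nXn := by
  intro grid dim _hDom
  obtain ⟨dx, dy⟩ := dim
  unfold Spec_sum_nXn
  rw [pv_A_eq, pv_B_eq]
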